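-- pv_equiv track=rewrite | github.com/daniel-reich/ubiquitous-fiesta | v3iQ4XiW385SrkWKo_1.py | final_result
-- ===== SOURCE A (Python) =====
-- def final_result(lst):
--     s=[]
--     i=0
--     j=0
--     a=0
--     while i<len(lst):
--         if len(s)==0:
--             a=lst[i]
--             s.append(lst[i])
--             j=1
--             i+=1
--         elif a==lst[i]:
--             j=2
--             i+=1
--         elif a!=lst[i] and j==2:
--             s.pop()
--             if len(s)==0:
--                 s.append(lst[i])
--                 j=1
--                 a=lst[i]
--                 i+=1
--             else :
--                 a=s[-1]
--                 j=1
--         elif a!=lst[i] and j==1 :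
--             a=lst[i]
--             s.append(lst[i])
--             i+=1
--         if i==len(lst) and j==2:
--             s.pop()
--     return s
-- ===== SOURCE B (Python) =====
-- def final_result(lst):
--     s = []
--     i = 0
--     n = len(lst)
--     while i < n:
--         x = lst[i]
--         if s and s[-1] == x:
--             v = s.pop()
--             while i < n and lst[i] == v:
--                 i += 1
--         else:
--             s.append(x)
--             i += 1
--     return s
-- ===== Notes on version B (the rewrite author's own statement) =====
-- stated objective: simpler
-- what changed: Replaced A's four-way scalar state machine (run-flag j, cached top a, trailing end-of-loop pop) by a plain stack reduction: on a top match pop once and skip the whole equal run with an inner while, so the stack alone is the state.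
import Mathlib
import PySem

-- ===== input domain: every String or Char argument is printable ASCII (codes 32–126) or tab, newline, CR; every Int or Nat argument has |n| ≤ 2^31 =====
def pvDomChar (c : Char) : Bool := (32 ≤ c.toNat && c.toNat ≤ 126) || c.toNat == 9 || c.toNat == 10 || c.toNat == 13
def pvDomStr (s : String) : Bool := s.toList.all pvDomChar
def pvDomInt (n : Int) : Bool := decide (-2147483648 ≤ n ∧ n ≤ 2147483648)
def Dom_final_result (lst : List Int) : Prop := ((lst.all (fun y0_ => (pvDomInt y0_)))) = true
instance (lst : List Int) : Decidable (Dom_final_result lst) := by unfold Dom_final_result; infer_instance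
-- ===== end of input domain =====

-- B is a plain stack reduction (pop the top on a match and skip the whole equal run)
-- replacing A's scalar state machine (a, j, trailing end-of-loop pop): simpler. A does not
-- mutate its argument; both ports model the Python stack with head = top and reverse at the end.

-- ===== PORT A =====
-- A's while-loop; state (s, i, j, a).  The trailing in-loop check `if i==len(lst) and j==2: s.pop()`
-- fires exactly when the loop is about to exit, so it is performed at loop exit here.
def finalLoopA (lst : List Int) (s : List Int) (i : Nat) (j a : Int) : List Int :=
  if h : i < lst.length then
    let x := lst[i]
    if s.length = 0 then
      finalLoopA lst (x :: s) (i + 1) 1 x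
    else if a = x then
      finalLoopA lst s (i + 1) 2 a
    else if a ≠ x ∧ j = 2 then
      -- s.pop()
      let s1 := s.tail
      if s1.length = 0 then
        finalLoopA lst (x :: s1) (i + 1) 1 x
      else
        finalLoopA lst s1 i 1 (s1.headD 0)   -- a = s[-1]; i not advanced
    else if a ≠ x ∧ j = 1 then
      finalLoopA lst (x :: s) (i + 1) 1 x
    else
      s  -- unreachable from the initial state (whenever s ≠ [] we have j ∈ {1,2}); Python would spin here
  else
    if j = 2 then s.tail else s
termination_by 2 * (lst.length - i) + s.length
decreasing_by
  · simp; omega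
  · simp; omega
  · simp; omega
  · simp only [List.length_tail]; omega
  · simp; omega

def final_result (lst : List Int) : List Int :=
  (finalLoopA lst [] 0 0 0).reverse

-- ===== PORT B =====
-- inner `while i < n and lst[i] == v: i += 1` (short-circuit `and` as a nested test)
def skipRun (lst : List Int) (v : Int) (i : Nat) : Nat :=
  if h : i < lst.length then
    if lst[i] = v then skipRun lst v (i + 1) else i
  else i
termination_by lst.length - i
decreasing_by omega

-- needed by finalLoopB's termination proof
theorem skipRun_ge (lst : List Int) (v : Int) (i : Nat) : i ≤ skipRun lst v i := by
  fun_induction skipRun with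
  | case1 => omega
  | case2 => omega
  | case3 => omega

theorem skipRun_gt (lst : List Int) (v : Int) (i : Nat) (h : i < lst.length)
    (hv : lst[i] = v) : i < skipRun lst v i := by
  rw [skipRun]
  simp only [h, dif_pos, hv, if_pos]
  exact Nat.lt_of_lt_of_le (Nat.lt_succ_self i) (skipRun_ge lst v (i + 1))

def finalLoopB (lst : List Int) (s : List Int) (i : Nat) : List Int :=
  if h : i < lst.length then
    let x := lst[i]
    match s with
    | [] => finalLoopB lst [x] (i + 1)
    | v :: rest =>
      if hv : v = x then finalLoopB lst rest (skipRun lst v i)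
      else finalLoopB lst (x :: v :: rest) (i + 1)
  else s
termination_by lst.length - i
decreasing_by
  · omega
  · have := skipRun_gt lst v i h (by omega)
    omega
  · omega

def final_result_alt (lst : List Int) : List Int :=
  (finalLoopB lst [] 0).reverse

-- ===== PRECONDITION & SPEC =====
def Spec_final_result (lst : List Int) (out : List Int) : Prop := out = final_result_alt lst
instance (lst : List Int) (out : List Int) : Decidable (Spec_final_result lst out) := by unfold Spec_final_result; infer_instance

-- ===== CLAIM (what is proved, stated in full; the proofs are below) =====
def Claim_equal_final_result : Prop := ∀ (lst : List Int), Dom_final_result lst → Spec_final_result lst (final_result lst)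

-- ===== LEMMAS AND PROOFS =====

-- one-step unfolding lemmas for the three loops

theorem skipRun_stop {lst : List Int} {v : Int} {i : Nat} (h : ¬ i < lst.length) :
    skipRun lst v i = i := by rw [skipRun]; simp [h]

theorem skipRun_eq {lst : List Int} {v : Int} {i : Nat} (h : i < lst.length)
    (hv : lst[i] = v) : skipRun lst v i = skipRun lst v (i + 1) := by
  rw [skipRun]; simp [h, hv]

theorem skipRun_ne {lst : List Int} {v : Int} {i : Nat} (h : i < lst.length)
    (hv : lst[i] ≠ v) : skipRun lst v i = i := by
  rw [skipRun]; simp [h, hv]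

theorem loopB_ge {lst s : List Int} {i : Nat} (h : ¬ i < lst.length) :
    finalLoopB lst s i = s := by rw [finalLoopB]; simp [h]

theorem loopB_nil {lst : List Int} {i : Nat} (h : i < lst.length) :
    finalLoopB lst [] i = finalLoopB lst [lst[i]] (i + 1) := by
  rw [finalLoopB]; simp [h]

theorem loopB_pop {lst : List Int} {v : Int} {rest : List Int} {i : Nat}
    (h : i < lst.length) (hv : v = lst[i]) :
    finalLoopB lst (v :: rest) i = finalLoopB lst rest (skipRun lst v i) := by
  rw [finalLoopB]; simp [h, hv]

theorem loopB_push {lst : List Int} {v : Int} {rest : List Int} {i : Nat}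
    (h : i < lst.length) (hv : ¬ v = lst[i]) :
    finalLoopB lst (v :: rest) i = finalLoopB lst (lst[i] :: v :: rest) (i + 1) := by
  rw [finalLoopB]; simp [h, hv]

theorem loopA_nil {lst : List Int} {i : Nat} {j a : Int} (h : i < lst.length) :
    finalLoopA lst [] i j a = finalLoopA lst [lst[i]] (i + 1) 1 lst[i] := by
  rw [finalLoopA]; simp [h]

theorem loopA_ge {lst s : List Int} {i : Nat} {j a : Int} (h : ¬ i < lst.length) :
    finalLoopA lst s i j a = if j = 2 then s.tail else s := by
  rw [finalLoopA]; simp [h]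

theorem loopA_dup {lst : List Int} {a : Int} {rest : List Int} {i : Nat} {j : Int}
    (h : i < lst.length) (ha : a = lst[i]) :
    finalLoopA lst (a :: rest) i j a = finalLoopA lst (a :: rest) (i + 1) 2 a := by
  rw [finalLoopA]; simp [h, ha]

theorem loopA_push1 {lst : List Int} {a : Int} {rest : List Int} {i : Nat}
    (h : i < lst.length) (ha : ¬ a = lst[i]) :
    finalLoopA lst (a :: rest) i 1 a = finalLoopA lst (lst[i] :: a :: rest) (i + 1) 1 lst[i] := by
  rw [finalLoopA]; simp [h, ha]

theorem loopA_pop_nil {lst : List Int} {a : Int} {i : Nat}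
    (h : i < lst.length) (ha : ¬ a = lst[i]) :
    finalLoopA lst [a] i 2 a = finalLoopA lst [lst[i]] (i + 1) 1 lst[i] := by
  rw [finalLoopA]; simp [h, ha]

theorem loopA_pop_cons {lst : List Int} {a b : Int} {rest : List Int} {i : Nat}
    (h : i < lst.length) (ha : ¬ a = lst[i]) :
    finalLoopA lst (a :: b :: rest) i 2 a = finalLoopA lst (b :: rest) i 1 b := by
  rw [finalLoopA]; simp [h, ha]

-- the bisimulation: from any reachable state, A's state machine and B's stack reduction agree.
-- j = 1 corresponds to B at the same stack and index; j = 2 (top duplicated) corresponds to B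
-- having already popped the top and being about to skip the rest of its run.
theorem key (lst : List Int) : ∀ (m i : Nat) (a : Int) (rest : List Int),
    2 * (lst.length - i) + rest.length < m →
    finalLoopA lst (a :: rest) i 1 a = finalLoopB lst (a :: rest) i ∧
    finalLoopA lst (a :: rest) i 2 a = finalLoopB lst rest (skipRun lst a i) := by
  intro m
  induction m with
  | zero => intro i a rest h; omega
  | succ m ih =>
    intro i a rest hm
    by_cases hi : i < lst.length
    · by_cases hax : a = lst[i]
      · constructor
        · rw [loopA_dup hi hax, loopB_pop hi hax, skipRun_eq hi hax.symm]
          exact (ih (i + 1) a rest (by omega)).2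
        · rw [loopA_dup hi hax, skipRun_eq hi hax.symm]
          exact (ih (i + 1) a rest (by omega)).2
      · constructor
        · rw [loopA_push1 hi hax, loopB_push hi hax]
          exact (ih (i + 1) (lst[i]) (a :: rest) (by simp; omega)).1
        · rw [skipRun_ne hi (fun he => hax he.symm)]
          cases rest with
          | nil =>
            rw [loopA_pop_nil hi hax, loopB_nil hi]
            exact (ih (i + 1) (lst[i]) [] (by omega)).1
          | cons b rest' =>
            rw [loopA_pop_cons hi hax]
            exact (ih i b rest' (by simp at hm; omega)).1
    · constructor
      · rw [loopA_ge hi, loopB_ge hi]; simp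
      · rw [loopA_ge hi, skipRun_stop hi, loopB_ge hi]; simp

-- ===== VERDICT (by name: the statement is the Claim_ definition above) =====
theorem final_result_spec : Claim_equal_final_result := by
  intro lst _
  unfold Spec_final_result final_result final_result_alt
  cases lst with
  | nil =>
    rw [loopA_ge (by simp), loopB_ge (by simp)]; simp
  | cons y ys =>
    have h0 : 0 < (y :: ys).length := by simp
    rw [loopA_nil h0, loopB_nil h0]
    exact congrArg List.reverse
      ((key (y :: ys) (2 * (y :: ys).length + 1) 1 ((y :: ys)[0]) [] (by simp)).1)
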